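-- pv_equiv track=rewrite | github.com/ekene-e/combinatorics-code | Novelli-Pak-Stoyanovski/novelli_pak_stoyanovski.py | CellOrder
-- ===== SOURCE A (Python) =====
-- def CellOrder(T):
--     if not T:
--         return []
--     i = 0
--     while i < len(T) - 1 and len(T[i + 1]) == len(T[0]):
--         i += 1
--     if len(T[i]) > 1:
--         T1 = T.copy()
--         T1[i] = T1[i][:-1]
--     else:
--         T1 = T[:i] + T[i + 1:]
--     return [[i + 1, len(T[i])]] + CellOrder(T1)
-- ===== SOURCE B (Python) =====
-- def CellOrder(T):
--     # Work on row lengths only (A's result depends only on the shape),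
--     # decrementing counters in place and tracking the block boundary j
--     # incrementally instead of copying rows and rescanning each step.
--     L = [len(row) for row in T]
--     out = []
--     j = 0
--     while j + 1 < len(L) and L[j + 1] == L[0]:
--         j += 1
--     while L:
--         v = L[j]
--         out.append([j + 1, v])
--         if v > 1:
--             L[j] = v - 1
--         else:
--             del L[j]
--         if j > 0:
--             j -= 1
--         else:
--             j = 0
--             while j + 1 < len(L) and L[j + 1] == L[0]:
--                 j += 1
--     return out
-- ===== Notes on version B (the rewrite author's own statement) =====
-- stated objective: faster
-- what changed: B simulates the peeling on a mutable array of row lengths, decrementing/deleting counters and tracking the block boundary incrementally, instead of A's recursion that copies the whole tableau and rescans the leading block at every step.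
import Mathlib
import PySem

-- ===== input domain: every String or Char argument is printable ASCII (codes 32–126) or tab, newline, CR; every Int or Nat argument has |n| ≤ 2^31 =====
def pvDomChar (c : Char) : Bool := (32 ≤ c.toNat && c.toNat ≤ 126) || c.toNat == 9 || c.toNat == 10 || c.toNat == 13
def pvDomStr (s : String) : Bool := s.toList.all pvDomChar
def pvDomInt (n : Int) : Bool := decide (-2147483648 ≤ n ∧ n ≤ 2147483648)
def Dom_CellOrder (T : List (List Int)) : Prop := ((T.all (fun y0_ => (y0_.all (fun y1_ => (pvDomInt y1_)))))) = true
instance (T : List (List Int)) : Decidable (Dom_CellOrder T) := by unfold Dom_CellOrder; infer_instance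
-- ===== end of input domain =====

-- B replaces A's per-step row copies and rescans by a mutable row-length array with an
-- incrementally tracked block boundary; measured asymptotically faster on large inputs.

-- ===== PORT A =====
-- the `while` that finds the last row of the leading block of equal-length rows
-- (fuel = T.length bounds the iterations; the loop stops at i = len-1 at the latest)
def CellOrderFind (T : List (List Int)) (i : Nat) (fuel : Nat) : Nat :=
  match fuel with
  | 0 => i
  | f + 1 =>
    if i < T.length - 1 ∧ (T.getD (i + 1) []).length = (T.getD 0 []).length then
      CellOrderFind T (i + 1) f
    else i

-- termination helpers for the port's recursion (cited by name in decreasing_by)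
theorem pvFindLe (T : List (List Int)) :
    ∀ (fuel i : Nat), i ≤ T.length - 1 → CellOrderFind T i fuel ≤ T.length - 1 := by
  intro fuel
  induction fuel with
  | zero => intro i h; simpa [CellOrderFind] using h
  | succ f ih =>
    intro i h
    unfold CellOrderFind
    split
    · next hc => exact ih (i + 1) (by omega)
    · exact h

theorem pvSumSet (l : List (List Int)) :
    ∀ (i : Nat), i < l.length → 1 < (l.getD i []).length →
      ((l.set i (l.getD i []).dropLast).map (fun r => r.length + 1)).sum
        < ((l.map (fun r => r.length + 1)).sum) := by
  induction l with
  | nil => intro i h; simp at h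
  | cons a t ih =>
    intro i hi hl
    cases i with
    | zero =>
      simp only [List.getD_cons_zero] at hl
      simp [List.length_dropLast]
      omega
    | succ j =>
      simp only [List.getD_cons_succ] at hl ⊢
      simp only [List.set_cons_succ, List.map_cons, List.sum_cons]
      have := ih j (by simpa using hi) hl
      omega

theorem pvSumErase (l : List (List Int)) :
    ∀ (i : Nat), i < l.length →
      ((l.take i ++ l.drop (i + 1)).map (fun r => r.length + 1)).sum
        < ((l.map (fun r => r.length + 1)).sum) := by
  induction l with
  | nil => intro i h; simp at h
  | cons a t ih =>
    intro i hi
    cases i with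
    | zero =>
      simp only [List.take_zero, List.drop_succ_cons, List.drop_zero, List.nil_append,
        List.map_cons, List.sum_cons]
      omega
    | succ j =>
      simp only [List.take_succ_cons, List.drop_succ_cons, List.cons_append,
        List.map_cons, List.sum_cons]
      have := ih j (by simpa using hi)
      omega

def CellOrder (T : List (List Int)) : List (List Int) :=
  if hT : T = [] then []
  else
    let i := CellOrderFind T 0 T.length
    if 1 < (T.getD i []).length then
      -- T1 = T.copy(); T1[i] = T1[i][:-1]   ([:-1] on a list = dropLast, exact)
      [[(i : Int) + 1, ((T.getD i []).length : Int)]] ++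
        CellOrder (T.set i (T.getD i []).dropLast)
    else
      -- T1 = T[:i] + T[i+1:]
      [[(i : Int) + 1, ((T.getD i []).length : Int)]] ++
        CellOrder (T.take i ++ T.drop (i + 1))
  termination_by ((T.map (fun r => r.length + 1)).sum)
  decreasing_by
  · have h := pvFindLe T T.length 0 (by omega)
    have hT0 : 0 < T.length := List.length_pos_iff.mpr hT
    exact pvSumSet T (CellOrderFind T 0 T.length) (by omega) (by assumption)
  · have h := pvFindLe T T.length 0 (by omega)
    have hT0 : 0 < T.length := List.length_pos_iff.mpr hT
    exact pvSumErase T (CellOrderFind T 0 T.length) (by omega)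

-- ===== PORT B =====
-- the inner `while` that extends the block boundary j over equal leading lengths
def CellOrderExt (L : List Int) (j : Nat) (fuel : Nat) : Nat :=
  match fuel with
  | 0 => j
  | f + 1 =>
    if j + 1 < L.length ∧ L.getD (j + 1) 0 = L.getD 0 0 then
      CellOrderExt L (j + 1) f
    else j

-- the outer `while L:` loop (fuel = Σ (len+1) bounds the iterations: each step either
-- decrements an entry or deletes one, so it is a totality guard only)
def CellOrderLoop (L : List Int) (j : Nat) (out : List (List Int)) (fuel : Nat) :
    List (List Int) :=
  match fuel with
  | 0 => out
  | f + 1 =>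
    if L = [] then out
    else
      let v := L.getD j 0
      let out' := out ++ [[(j : Int) + 1, v]]
      let L' := if 1 < v then L.set j (v - 1) else L.eraseIdx j
      let j' := if 0 < j then j - 1 else CellOrderExt L' 0 L'.length
      CellOrderLoop L' j' out' f

def CellOrder_alt (T : List (List Int)) : List (List Int) :=
  let L := T.map (fun r => ((r.length : Int)))
  CellOrderLoop L (CellOrderExt L 0 L.length) [] ((L.map (fun v => v.toNat + 1)).sum)

-- ===== PRECONDITION & SPEC =====
def Spec_CellOrder (T : List (List Int)) (out : List (List Int)) : Prop := out = CellOrder_alt T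
instance (T : List (List Int)) (out : List (List Int)) : Decidable (Spec_CellOrder T out) := by unfold Spec_CellOrder; infer_instance

-- ===== CLAIM (what is proved, stated in full; the proofs are below) =====
def Claim_equal_CellOrder : Prop := ∀ (T : List (List Int)), Dom_CellOrder T → Spec_CellOrder T (CellOrder T)

-- ===== LEMMAS AND PROOFS =====

-- the row-length list B works on
def pvLens (T : List (List Int)) : List Int := T.map (fun r => ((r.length : Int)))

-- the loop invariant on the tracked boundary j: rows 0..j all have the first row's
-- length and j is the last such row (or T is empty and j is irrelevant)
def pvInv (L : List Int) (j : Nat) : Prop :=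
  L = [] ∨
    (j < L.length ∧ (∀ k, k ≤ j → L.getD k 0 = L.getD 0 0) ∧
      (j + 1 = L.length ∨ L.getD (j + 1) 0 ≠ L.getD 0 0))

theorem pvLens_length (T : List (List Int)) : (pvLens T).length = T.length := by
  simp [pvLens]

theorem pvLens_getD (T : List (List Int)) (k : Nat) (hk : k < T.length) :
    (pvLens T).getD k 0 = ((T.getD k []).length : Int) := by
  rw [List.getD_eq_getElem _ _ (by simpa [pvLens] using hk),
    List.getD_eq_getElem _ _ hk]
  simp [pvLens]

theorem pvFind_ext (T : List (List Int)) (hT : T ≠ []) :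
    ∀ (fuel i : Nat), CellOrderFind T i fuel = CellOrderExt (pvLens T) i fuel := by
  intro fuel
  induction fuel with
  | zero => intro i; rfl
  | succ f ih =>
    intro i
    have hlen : (pvLens T).length = T.length := pvLens_length T
    have hT0 : 0 < T.length := List.length_pos_iff.mpr hT
    unfold CellOrderFind CellOrderExt
    by_cases h1 : i + 1 < T.length
    · have hiff : ((T.getD (i + 1) []).length = (T.getD 0 []).length)
          ↔ ((pvLens T).getD (i + 1) 0 = (pvLens T).getD 0 0) := by
        rw [pvLens_getD T (i + 1) h1, pvLens_getD T 0 hT0]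
        exact_mod_cast Iff.rfl
      by_cases h2 : (T.getD (i + 1) []).length = (T.getD 0 []).length
      · rw [if_pos ⟨by omega, h2⟩, if_pos ⟨by omega, hiff.mp h2⟩]
        exact ih (i + 1)
      · rw [if_neg (by push_neg; intro _; exact h2),
          if_neg (by push_neg; intro _; exact fun h => h2 (hiff.mpr h))]
    · rw [if_neg (by omega), if_neg (by omega)]

theorem pvExt_eq (L : List Int) (i : Nat) (hi : i < L.length)
    (hall : ∀ k, k ≤ i → L.getD k 0 = L.getD 0 0)
    (hmax : i + 1 = L.length ∨ L.getD (i + 1) 0 ≠ L.getD 0 0) :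
    ∀ (fuel j : Nat), j ≤ i → L.length ≤ fuel + j → CellOrderExt L j fuel = i := by
  intro fuel
  induction fuel with
  | zero => intro j hj hf; omega
  | succ f ih =>
    intro j hj hf
    unfold CellOrderExt
    by_cases hji : j < i
    · rw [if_pos ⟨by omega, by rw [hall (j + 1) (by omega), hall 0 (by omega)]⟩]
      exact ih (j + 1) (by omega) (by omega)
    · have hji' : j = i := by omega
      subst hji'
      rcases hmax with h | h
      · rw [if_neg (by omega)]
      · rw [if_neg (by push_neg; intro _; exact h)]

theorem pvExt_inv (L : List Int) :
    ∀ (fuel j : Nat), j < L.length → (∀ k, k ≤ j → L.getD k 0 = L.getD 0 0) →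
      (j ≤ CellOrderExt L j fuel ∧ CellOrderExt L j fuel < L.length ∧
        (∀ k, k ≤ CellOrderExt L j fuel → L.getD k 0 = L.getD 0 0) ∧
        (L.length ≤ fuel + j →
          (CellOrderExt L j fuel + 1 = L.length ∨
            L.getD (CellOrderExt L j fuel + 1) 0 ≠ L.getD 0 0))) := by
  intro fuel
  induction fuel with
  | zero =>
    intro j hj hall
    refine ⟨le_refl _, by simpa [CellOrderExt] using hj, by simpa [CellOrderExt] using hall, ?_⟩
    intro h; omega
  | succ f ih =>
    intro j hj hall
    unfold CellOrderExt
    split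
    · next hc =>
      have hall' : ∀ k, k ≤ j + 1 → L.getD k 0 = L.getD 0 0 := by
        intro k hk
        by_cases hkj : k ≤ j
        · exact hall k hkj
        · have : k = j + 1 := by omega
          subst this; exact hc.2
      have := ih (j + 1) hc.1 hall'
      exact ⟨by omega, this.2.1, this.2.2.1, fun h => this.2.2.2 (by omega)⟩
    · next hc =>
      push_neg at hc
      refine ⟨le_refl _, hj, hall, fun _ => ?_⟩
      by_cases h1 : j + 1 < L.length
      · exact Or.inr (hc h1)
      · exact Or.inl (by omega)

theorem pvLoop_nil (j : Nat) (out : List (List Int)) (fuel : Nat) :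
    CellOrderLoop [] j out fuel = out := by
  cases fuel <;> simp [CellOrderLoop]

theorem pvGetD_set_self (L : List Int) (a : Int) (j : Nat) (h : j < L.length) :
    (L.set j a).getD j 0 = a := by
  rw [List.getD_eq_getElem _ _ (by simpa), List.getElem_set_self]

theorem pvGetD_set_ne (L : List Int) (a : Int) (j k : Nat) (h : k < L.length) (hne : k ≠ j) :
    (L.set j a).getD k 0 = L.getD k 0 := by
  rw [List.getD_eq_getElem _ _ (by simpa), List.getD_eq_getElem _ _ h,
    List.getElem_set_ne (by omega)]

theorem pvGetD_erase_lt (L : List Int) (j k : Nat) (h : k < j) (hj : j < L.length) :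
    (L.eraseIdx j).getD k 0 = L.getD k 0 := by
  have hlen : (L.eraseIdx j).length = L.length - 1 := by
    rw [List.length_eraseIdx]; simp [hj]
  rw [List.getD_eq_getElem _ _ (by omega), List.getD_eq_getElem _ _ (by omega),
    List.getElem_eraseIdx_of_lt _ h]

theorem pvGetD_erase_ge (L : List Int) (j k : Nat) (h : j ≤ k) (hk : k + 1 < L.length) :
    (L.eraseIdx j).getD k 0 = L.getD (k + 1) 0 := by
  have hlen : (L.eraseIdx j).length = L.length - 1 := by
    have hj : j < L.length := by omega
    rw [List.length_eraseIdx]; simp [hj]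
  rw [List.getD_eq_getElem _ _ (by omega), List.getD_eq_getElem _ _ hk,
    List.getElem_eraseIdx_of_ge _ h]

theorem pvSumPos (T : List (List Int)) (hT : T ≠ []) :
    1 ≤ (T.map (fun r => r.length + 1)).sum := by
  cases T with
  | nil => exact absurd rfl hT
  | cons a t => simp [List.sum_cons]; omega

-- main correspondence: with the invariant, B's loop appends exactly A's output
theorem pvMain (n : Nat) :
    ∀ (T : List (List Int)) (j : Nat) (out : List (List Int)) (fuel : Nat),
      (T.map (fun r => r.length + 1)).sum ≤ n →
      (T.map (fun r => r.length + 1)).sum ≤ fuel →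
      pvInv (pvLens T) j →
      CellOrderLoop (pvLens T) j out fuel = out ++ CellOrder T := by
  induction n with
  | zero =>
    intro T j out fuel hn _ _
    have hT : T = [] := by
      cases T with
      | nil => rfl
      | cons a t => simp only [List.map_cons, List.sum_cons] at hn; omega
    subst hT
    rw [show pvLens [] = ([] : List Int) from rfl, pvLoop_nil, CellOrder]
    simp
  | succ n IH =>
    intro T j out fuel hn hfuel hinv
    by_cases hT : T = []
    · subst hT
      rw [show pvLens [] = ([] : List Int) from rfl, pvLoop_nil, CellOrder]
      simp
    · have hpos := pvSumPos T hT
      have hL : pvLens T ≠ [] := by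
        simpa [pvLens, List.map_eq_nil_iff] using hT
      obtain ⟨fuel, rfl⟩ : ∃ f, fuel = f + 1 := ⟨fuel - 1, by omega⟩
      rcases hinv with hnil | ⟨hj, hall, hmax⟩
      · exact absurd hnil hL
      have hjT : j < T.length := by rw [pvLens_length] at hj; exact hj
      have hT0 : 0 < T.length := by omega
      have hvL : (pvLens T).getD j 0 = ((T.getD j []).length : Int) := pvLens_getD T j hjT
      -- the scanned index of A equals the tracked boundary j of B
      have hfind : CellOrderFind T 0 T.length = j := by
        rw [pvFind_ext T hT, pvExt_eq (pvLens T) j hj hall hmax T.length 0 (by omega)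
          (by rw [pvLens_length]; omega)]
      -- unfold one step of the loop
      rw [CellOrderLoop, if_neg hL]
      -- unfold one step of A
      rw [CellOrder, dif_neg hT]
      simp only [hfind]
      by_cases hv : 1 < (T.getD j []).length
      · -- decrement case
        rw [if_pos hv, if_pos (by rw [hvL]; exact_mod_cast hv)]
        set T1 := T.set j (T.getD j []).dropLast with hT1
        have hM : pvLens T1 = (pvLens T).set j ((pvLens T).getD j 0 - 1) := by
          rw [hT1, pvLens, List.map_set, hvL]
          have : (((T.getD j []).dropLast.length : Nat) : Int)
              = ((T.getD j []).length : Int) - 1 := by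
            rw [List.length_dropLast]; omega
          rw [this]; rfl
        have hsum : (T1.map (fun r => r.length + 1)).sum
            < (T.map (fun r => r.length + 1)).sum := pvSumSet T j hjT hv
        have hinv1 : pvInv (pvLens T1) (if 0 < j then j - 1
            else CellOrderExt ((pvLens T).set j ((pvLens T).getD j 0 - 1)) 0
              ((pvLens T).set j ((pvLens T).getD j 0 - 1)).length) := by
          rw [hM]
          set L' := (pvLens T).set j ((pvLens T).getD j 0 - 1) with hL'
          have hlen' : L'.length = (pvLens T).length := by rw [hL']; simp
          by_cases hj0 : 0 < j
          · rw [if_pos hj0]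
            refine Or.inr ⟨by omega, ?_, ?_⟩
            · intro k hk
              rw [pvGetD_set_ne _ _ _ _ (by omega) (by omega),
                pvGetD_set_ne _ _ _ 0 (by omega) (by omega)]
              exact hall k (by omega)
            · refine Or.inr ?_
              rw [show j - 1 + 1 = j by omega, pvGetD_set_self _ _ _ hj,
                pvGetD_set_ne _ _ _ 0 (by omega) (by omega), ← hall j (le_refl j)]
              omega
          · rw [if_neg hj0]
            have hL'ne : L' ≠ [] := by
              intro h; rw [← List.length_eq_zero_iff] at h; omega
            have h0 : (0 : Nat) < L'.length := by omega
            have := pvExt_inv L' L'.length 0 h0 (fun k hk => congrArg (fun m => _root_.List.getD _ m 0) (Nat.le_zero.mp hk))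
            exact Or.inr ⟨this.2.1, this.2.2.1, this.2.2.2 (by omega)⟩
        rw [hvL] at hM hinv1 ⊢
        rw [← hM] at hinv1 ⊢
        rw [IH T1 _ _ fuel (by omega) (by omega) hinv1, List.append_assoc]
      · -- deletion case
        rw [if_neg hv, if_neg (by rw [hvL]; exact_mod_cast hv)]
        set T1 := T.take j ++ T.drop (j + 1) with hT1
        have hM : pvLens T1 = (pvLens T).eraseIdx j := by
          rw [hT1, pvLens, List.map_append, List.map_take, List.map_drop,
            List.eraseIdx_eq_take_drop_succ]
          rfl
        have hsum : (T1.map (fun r => r.length + 1)).sum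
            < (T.map (fun r => r.length + 1)).sum := pvSumErase T j hjT
        have hinv1 : pvInv (pvLens T1) (if 0 < j then j - 1
            else CellOrderExt ((pvLens T).eraseIdx j) 0 ((pvLens T).eraseIdx j).length) := by
          rw [hM]
          set L' := (pvLens T).eraseIdx j with hL'
          have hlen' : L'.length = (pvLens T).length - 1 := by
            rw [hL', List.length_eraseIdx]; simp [hj]
          by_cases hj0 : 0 < j
          · rw [if_pos hj0]
            refine Or.inr ⟨by omega, ?_, ?_⟩
            · intro k hk
              rw [hL', pvGetD_erase_lt _ _ _ (by omega) hj,
                pvGetD_erase_lt _ _ 0 (by omega) hj]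
              exact hall k (by omega)
            · by_cases hend : j + 1 = (pvLens T).length
              · exact Or.inl (by omega)
              · refine Or.inr ?_
                rw [show j - 1 + 1 = j by omega, hL',
                  pvGetD_erase_ge _ _ _ (le_refl j) (by omega),
                  pvGetD_erase_lt _ _ 0 (by omega) hj]
                rcases hmax with h | h
                · exact absurd h hend
                · exact h
          · rw [if_neg hj0]
            by_cases hL'e : L' = []
            · exact Or.inl hL'e
            · have h0 : (0 : Nat) < L'.length := List.length_pos_iff.mpr hL'e
              have := pvExt_inv L' L'.length 0 h0 (fun k hk => congrArg (fun m => _root_.List.getD _ m 0) (Nat.le_zero.mp hk))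
              exact Or.inr ⟨this.2.1, this.2.2.1, this.2.2.2 (by omega)⟩
        rw [hvL]
        rw [← hM] at hinv1 ⊢
        rw [IH T1 _ _ fuel (by omega) (by omega) hinv1, List.append_assoc]

theorem pvMeas (T : List (List Int)) :
    ((pvLens T).map (fun v => v.toNat + 1)).sum = (T.map (fun r => r.length + 1)).sum := by
  induction T with
  | nil => rfl
  | cons a t ih => simp only [pvLens, List.map_cons, List.sum_cons] at ih ⊢; omega

-- ===== VERDICT (by name: the statement is the Claim_ definition above) =====
theorem CellOrder_spec : Claim_equal_CellOrder := by
  intro T _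
  show CellOrder T = CellOrder_alt T
  unfold CellOrder_alt
  by_cases hT : T = []
  · subst hT
    rw [CellOrder]
    simp [pvLoop_nil]
  · have hL : pvLens T ≠ [] := by simpa [pvLens, List.map_eq_nil_iff] using hT
    have h0 : (0 : Nat) < (pvLens T).length := List.length_pos_iff.mpr hL
    have hext := pvExt_inv (pvLens T) (pvLens T).length 0 h0 (fun k hk => congrArg (fun m => _root_.List.getD _ m 0) (Nat.le_zero.mp hk))
    have hinv : pvInv (pvLens T)
        (CellOrderExt (pvLens T) 0 (pvLens T).length) :=
      Or.inr ⟨hext.2.1, hext.2.2.1, hext.2.2.2 (by omega)⟩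
    have := pvMain ((T.map (fun r => r.length + 1)).sum) T
      (CellOrderExt (pvLens T) 0 (pvLens T).length) []
      (((pvLens T).map (fun v => v.toNat + 1)).sum) (le_refl _)
      (by rw [pvMeas]) hinv
    rw [show (T.map fun r => ((r.length : Int))) = pvLens T from rfl]
    rw [this]
    simp
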